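-- pv_equiv track=rewrite | github.com/mode80/YahtzeeBotPython | yahtzeebot.py | score_n_of_a_kind
-- ===== SOURCE A (Python) =====
-- DieVals = tuple[int,int,int,int,int]
--
-- def score_n_of_a_kind(n:int,sorted_dievals:DieVals)->int:
--     inarow=1; maxinarow=1; lastval=-1; sum=0;
--     for x in sorted_dievals:
--         if x==lastval: inarow = inarow + 1
--         else: inarow=1
--         maxinarow = max(inarow,maxinarow)
--         lastval = x
--         sum+=x
--     if maxinarow>=n: return sum
--     else: return 0
-- ===== SOURCE B (Python) =====
-- def score_n_of_a_kind(n, sorted_dievals):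
--     d = list(sorted_dievals)
--     cuts = [0] + [i for i in range(1, 5) if d[i] != d[i - 1]] + [5]
--     longest = max(b - a for a, b in zip(cuts, cuts[1:]))
--     return sum(d) if longest >= n else 0
-- ===== Notes on version B (the rewrite author's own statement) =====
-- stated objective: alternative
-- what changed: B replaces A's running consecutive-run accumulator (inarow/maxinarow/lastval threaded through one loop) by computing the cut positions between unequal neighbours and taking the longest run as the maximum difference of consecutive cuts, with the total summed separately.
-- intended difference: On inputs whose first die is -1, whose leading run of -1s is the (tied-)longest run, with n exactly one more than that run length and a nonzero dice total, A's lastval=-1 sentinel counts a phantom extra -1 and returns the dice sum while B returns 0; B is intended since the first die starts a fresh run. — e.g. on score_n_of_a_kind(2, (-1, 1, 2, 3, 4)): A returns 9, B returns 0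
import Mathlib
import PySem

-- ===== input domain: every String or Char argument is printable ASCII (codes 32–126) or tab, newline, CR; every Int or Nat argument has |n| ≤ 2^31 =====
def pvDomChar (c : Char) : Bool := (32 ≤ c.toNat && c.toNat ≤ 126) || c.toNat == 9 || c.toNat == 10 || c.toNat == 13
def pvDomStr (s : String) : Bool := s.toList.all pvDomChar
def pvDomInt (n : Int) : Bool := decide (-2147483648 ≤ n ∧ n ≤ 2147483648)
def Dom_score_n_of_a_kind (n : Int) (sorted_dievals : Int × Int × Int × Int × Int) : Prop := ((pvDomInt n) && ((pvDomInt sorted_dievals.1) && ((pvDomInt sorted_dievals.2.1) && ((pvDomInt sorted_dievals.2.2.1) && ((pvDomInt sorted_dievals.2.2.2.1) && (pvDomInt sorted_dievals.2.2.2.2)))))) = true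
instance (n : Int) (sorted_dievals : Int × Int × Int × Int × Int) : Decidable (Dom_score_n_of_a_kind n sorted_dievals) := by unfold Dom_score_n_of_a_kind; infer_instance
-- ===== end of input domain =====

-- B replaces A's running-run accumulator by cut positions between unequal neighbours
-- (run lengths = differences of consecutive cuts); objective: simpler/alternative, not faster.

-- ===== PORT A =====
-- shared plumbing: the five dice of the input tuple, in order (Python's 'for x in sorted_dievals' / list(t))
def pvDice (t : Int × Int × Int × Int × Int) : List Int :=
  match t with
  | (a, b, c, d, e) => [a, b, c, d, e]

def score_n_of_a_kind (n : Int) (sorted_dievals : Int × Int × Int × Int × Int) : Int :=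
  -- state: (inarow, maxinarow, lastval, sum), initial (1, 1, -1, 0)
  let st := (pvDice sorted_dievals).foldl
    (fun (s : Int × Int × Int × Int) x =>
      let inarow := if x = s.2.2.1 then s.1 + 1 else 1
      let maxinarow := max inarow s.2.1
      (inarow, maxinarow, x, s.2.2.2 + x))
    (1, 1, -1, 0)
  if st.2.1 ≥ n then st.2.2.2 else 0

-- ===== PORT B =====
def score_n_of_a_kind_alt (n : Int) (sorted_dievals : Int × Int × Int × Int × Int) : Int :=
  let ds : List Int := pvDice sorted_dievals
  -- cuts = [0] + [i for i in range(1, 5) if d[i] != d[i-1]] + [5]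
  -- d[i] with i in 1..4 is always in range, so pyGet?'s default 0 is never used
  let cuts : List Int :=
    [0] ++ (PySem.List.pyRange 1 5 1).filter
      (fun i => (PySem.List.pyGet? ds i).getD 0 ≠ (PySem.List.pyGet? ds (i - 1)).getD 0) ++ [5]
  -- longest = max(b - a for a, b in zip(cuts, cuts[1:])); cuts has ≥ 2 elements, never empty
  let longest : Int := (PySem.List.max? ((cuts.zip cuts.tail).map (fun p => p.2 - p.1)) (fun x => x)).getD 0
  if longest ≥ n then ds.sum else 0

-- ===== PRECONDITION & SPEC =====
-- On inputs whose first die is -1, whose leading run of -1s is the (tied-)longest run, with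
-- n exactly one more than that run length and a nonzero dice total, A's 'lastval=-1' sentinel
-- counts a phantom extra -1 and A returns the dice sum, while B returns 0; B's value is intended
-- since the first die starts a fresh run. (Stated case by case over the leading-run length 1..5.)
def D_score_n_of_a_kind (n : Int) (sorted_dievals : Int × Int × Int × Int × Int) : Prop :=
  let l := pvDice sorted_dievals
  n = (l.takeWhile (· = -1)).length + 1 ∧ l.sum ≠ 0 ∧ ∀ v ∈ l, ¬ List.replicate n.toNat v <:+: l
instance (n : Int) (sorted_dievals : Int × Int × Int × Int × Int) : Decidable (D_score_n_of_a_kind n sorted_dievals) := by unfold D_score_n_of_a_kind; infer_instance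

def Spec_score_n_of_a_kind (n : Int) (sorted_dievals : Int × Int × Int × Int × Int) (out : Int) : Prop := ¬ D_score_n_of_a_kind n sorted_dievals → out = score_n_of_a_kind_alt n sorted_dievals
instance (n : Int) (sorted_dievals : Int × Int × Int × Int × Int) (out : Int) : Decidable (Spec_score_n_of_a_kind n sorted_dievals out) := by unfold Spec_score_n_of_a_kind; infer_instance

def pvDiffWitness_score_n_of_a_kind : Int × (Int × Int × Int × Int × Int) := (2, (-1, 1, 2, 3, 4))
def pvDiffWitnessOut_score_n_of_a_kind : Int × Int := (9, 0)

-- ===== CLAIM (what is proved, stated in full; the proofs are below) =====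
def Claim_unchanged_score_n_of_a_kind : Prop := ∀ (n : Int) (sorted_dievals : Int × Int × Int × Int × Int), Dom_score_n_of_a_kind n sorted_dievals → Spec_score_n_of_a_kind n sorted_dievals (score_n_of_a_kind n sorted_dievals)
def Claim_changed_score_n_of_a_kind : Prop := Dom_score_n_of_a_kind (pvDiffWitness_score_n_of_a_kind.1) (pvDiffWitness_score_n_of_a_kind.2) ∧ D_score_n_of_a_kind (pvDiffWitness_score_n_of_a_kind.1) (pvDiffWitness_score_n_of_a_kind.2) ∧ score_n_of_a_kind (pvDiffWitness_score_n_of_a_kind.1) (pvDiffWitness_score_n_of_a_kind.2) = pvDiffWitnessOut_score_n_of_a_kind.1 ∧ score_n_of_a_kind_alt (pvDiffWitness_score_n_of_a_kind.1) (pvDiffWitness_score_n_of_a_kind.2) = pvDiffWitnessOut_score_n_of_a_kind.2 ∧ pvDiffWitnessOut_score_n_of_a_kind.1 ≠ pvDiffWitnessOut_score_n_of_a_kind.2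
def Claim_exact_score_n_of_a_kind : Prop := ∀ (n : Int) (sorted_dievals : Int × Int × Int × Int × Int), Dom_score_n_of_a_kind n sorted_dievals → D_score_n_of_a_kind n sorted_dievals → score_n_of_a_kind n sorted_dievals ≠ score_n_of_a_kind_alt n sorted_dievals

-- ===== LEMMAS AND PROOFS =====
theorem pv_forall_ne (x : Int) : (∀ v : Int, ¬ v = x) ↔ False :=
  ⟨fun h => h x rfl, False.elim⟩

set_option maxHeartbeats 16000000 in
theorem pv_main : ∀ (n : Int) (t : Int × Int × Int × Int × Int),
    ¬ D_score_n_of_a_kind n t → score_n_of_a_kind n t = score_n_of_a_kind_alt n t := by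
  rintro n ⟨a, b, c, d, e⟩ hD
  by_cases h1 : a = -1 <;> by_cases h2 : b = a <;> by_cases h3 : c = b <;>
    by_cases h4 : d = c <;> by_cases h5 : e = d <;>
    simp only [D_score_n_of_a_kind] at hD <;> push Not at hD <;>
    simp_all [score_n_of_a_kind, score_n_of_a_kind_alt, pvDice, List.takeWhile, List.replicate,
      List.infix_cons_iff, List.cons_prefix_cons, PySem.List.pyRange, PySem.List.pyGet?,
      PySem.List.pyIdx?, PySem.List.max?, List.filter, max_def, List.range_succ] <;>
    first | omega | (split_ifs <;> omega)

-- ===== VERDICT (by name: the statement is the Claim_ definition above) =====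
theorem score_n_of_a_kind_spec : Claim_unchanged_score_n_of_a_kind := by
  intro n t _ hD
  exact pv_main n t hD

theorem score_n_of_a_kind_changed : Claim_changed_score_n_of_a_kind := by
  unfold Claim_changed_score_n_of_a_kind; decide

set_option maxHeartbeats 16000000 in
theorem score_n_of_a_kind_tight : Claim_exact_score_n_of_a_kind := by
  rintro n ⟨a, b, c, d, e⟩ _ hD
  revert hD
  by_cases h1 : a = -1 <;> by_cases h2 : b = a <;> by_cases h3 : c = b <;>
    by_cases h4 : d = c <;> by_cases h5 : e = d <;>
    simp only [D_score_n_of_a_kind] <;>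
    simp_all [score_n_of_a_kind, score_n_of_a_kind_alt, pvDice, List.takeWhile, List.replicate,
      List.infix_cons_iff, List.cons_prefix_cons, forall_and, pv_forall_ne,
      PySem.List.pyRange, PySem.List.pyGet?, PySem.List.pyIdx?, PySem.List.max?,
      List.filter, max_def, List.range_succ] <;>
    first | omega | (split_ifs <;> omega)
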